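-- pv_equiv track=rewrite | github.com/ingjcesarmojica/sofia-agent-v0z | app.py | improve_pronunciation
-- ===== SOURCE A (Python) =====
-- def improve_pronunciation(text):
--     """Mejora la pronunciación de texto legal con énfasis en palabras clave"""
--     # Palabras legales que necesitan mejor pronunciación
--     improvements = {
--         'abogada': 'abogáda',
--         'legal': 'legál',
--         'cliente': 'clienté',
--         'proceso': 'procéso',
--         'judicial': 'judiciál',
--         'documento': 'documentó',
--         'contrato': 'contráto',
--         'custodia': 'custódia',
--         'pensión': 'pensión',
--         'alimentaria': 'alimentária',
--         'herencia': 'heréncia',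
--         'testamento': 'testaménto',
--         'demanda': 'demánda',
--         'juzgado': 'juzgádo',
--     }
--
--     for word, replacement in improvements.items():
--         text = text.replace(word, f"<emphasis level=\"moderate\">{word}</emphasis>")
--
--     return text
-- ===== SOURCE B (Python) =====
-- # Single left-to-right scan: at each position try the keywords (dict order) and
-- # wrap the first match, instead of A's 14 sequential full-text replace passes.
-- _WORDS = ('abogada', 'legal', 'cliente', 'proceso', 'judicial', 'documento',
--           'contrato', 'custodia', 'pensión', 'alimentaria', 'herencia',
--           'testamento', 'demanda', 'juzgado')
--
--
-- def improve_pronunciation(text):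
--     """Mejora la pronunciación de texto legal con énfasis en palabras clave"""
--     out = []
--     i = 0
--     n = len(text)
--     while i < n:
--         for w in _WORDS:
--             if text.startswith(w, i):
--                 out.append('<emphasis level="moderate">' + w + '</emphasis>')
--                 i += len(w)
--                 break
--         else:
--             out.append(text[i])
--             i += 1
--     return ''.join(out)
-- ===== Notes on version B (the rewrite author's own statement) =====
-- stated objective: alternative
-- what changed: Replaces A's 14 sequential full-text str.replace passes by one left-to-right scan that wraps the first keyword matching at each position; Pre_ excludes texts containing one of 8 glue substrings (e.g. 'custodiabogada') where two keyword occurrences overlap and which one gets the emphasis tag is an accidental tie of A's pass order vs B's scan order.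
import Mathlib
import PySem

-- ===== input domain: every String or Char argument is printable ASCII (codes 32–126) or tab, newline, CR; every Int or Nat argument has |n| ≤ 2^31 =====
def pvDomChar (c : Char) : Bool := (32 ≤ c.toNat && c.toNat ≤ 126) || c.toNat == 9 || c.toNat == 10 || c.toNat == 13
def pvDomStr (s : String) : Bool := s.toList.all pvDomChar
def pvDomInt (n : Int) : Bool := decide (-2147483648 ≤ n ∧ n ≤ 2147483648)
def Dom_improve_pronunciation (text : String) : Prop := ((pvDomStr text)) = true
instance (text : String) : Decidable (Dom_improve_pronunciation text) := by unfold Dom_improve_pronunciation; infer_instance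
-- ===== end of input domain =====

-- B replaces A's 14 sequential full-text replace passes by one left-to-right scan
-- wrapping the first keyword that matches at each position (objective: alternative).

-- ===== PORT A =====
def pvImprovements : PySem.Dict String String := PySem.Dict.ofList
  [("abogada", "abogáda"), ("legal", "legál"), ("cliente", "clienté"),
   ("proceso", "procéso"), ("judicial", "judiciál"), ("documento", "documentó"),
   ("contrato", "contráto"), ("custodia", "custódia"), ("pensión", "pensión"),
   ("alimentaria", "alimentária"), ("herencia", "heréncia"),
   ("testamento", "testaménto"), ("demanda", "demánda"), ("juzgado", "juzgádo")]

def improve_pronunciation (text : String) : String :=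
  -- for word, replacement in improvements.items(): text = text.replace(word, f"<emphasis level=\"moderate\">{word}</emphasis>")
  pvImprovements.items.foldl
    (fun t wr => PySem.Str.replace t wr.1 ("<emphasis level=\"moderate\">" ++ wr.1 ++ "</emphasis>"))
    text

-- ===== PORT B =====
def pvWords : List (List Char) :=
  ["abogada".toList, "legal".toList, "cliente".toList, "proceso".toList,
   "judicial".toList, "documento".toList, "contrato".toList, "custodia".toList,
   "pensión".toList, "alimentaria".toList, "herencia".toList,
   "testamento".toList, "demanda".toList, "juzgado".toList]

def pvWrap (w : List Char) : List Char :=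
  "<emphasis level=\"moderate\">".toList ++ w ++ "</emphasis>".toList

-- the scanner loop of Source B: at each position try the keywords in order,
-- wrap the first match and jump past it, else copy the character
-- (the while-loop is ported with fuel = remaining length, which never runs out)
def altScanF : Nat → List Char → List Char
  | _, [] => []
  | 0, _ :: _ => []
  | f + 1, c :: t =>
    match pvWords.find? (fun w => w.isPrefixOf (c :: t)) with
    | some w => pvWrap w ++ altScanF f (List.drop (w.length - 1) t)
    | none => c :: altScanF f t

def altScan (cs : List Char) : List Char := altScanF cs.length cs

def improve_pronunciation_alt (text : String) : String :=
  String.ofList (altScan text.toList)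

-- ===== PRECONDITION & SPEC =====
-- Pre_ excludes texts containing one of the 8 glue substrings below, on which a
-- dict-earlier keyword occurrence overlaps the tail of a dict-later keyword
-- occurrence: which of the two overlapping keywords gets the emphasis tag is an
-- accidental tie (A's pass order wraps the dict-earlier one, B's scan order the
-- leftmost one) that no one would specify either way.
def Pre_improve_pronunciation (text : String) : Prop :=
  PySem.Str.isIn "alimentariabogada" text = false ∧
  PySem.Str.isIn "custodiabogada" text = false ∧
  PySem.Str.isIn "demandabogada" text = false ∧
  PySem.Str.isIn "demandalimentaria" text = false ∧
  PySem.Str.isIn "herenciabogada" text = false ∧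
  PySem.Str.isIn "herencialimentaria" text = false ∧
  PySem.Str.isIn "judicialegal" text = false ∧
  PySem.Str.isIn "juzgadocumento" text = false
instance (text : String) : Decidable (Pre_improve_pronunciation text) := by
  unfold Pre_improve_pronunciation; infer_instance

def pvWitness_improve_pronunciation : String := "la abogada revisa el contrato legal"

def Spec_improve_pronunciation (text : String) (out : String) : Prop :=
  out = improve_pronunciation_alt text
instance (text : String) (out : String) : Decidable (Spec_improve_pronunciation text out) := by
  unfold Spec_improve_pronunciation; infer_instance

-- ===== CLAIM (what is proved, stated in full; the proofs are below) =====
def Claim_equal_improve_pronunciation : Prop := ∀ (text : String), Dom_improve_pronunciation text → Pre_improve_pronunciation text → Spec_improve_pronunciation text (improve_pronunciation text)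

-- ===== LEMMAS AND PROOFS =====

-- the 8 glue substrings of D_improve_pronunciation, as character lists
def pvPatterns : List (List Char) :=
  ["alimentariabogada".toList, "custodiabogada".toList, "demandabogada".toList,
   "demandalimentaria".toList, "herenciabogada".toList,
   "herencialimentaria".toList, "judicialegal".toList, "juzgadocumento".toList]

-- clean recursive model of CPython str.replace (leftmost, non-overlapping)
def repl (old new : List Char) (cs : List Char) : List Char :=
  match cs with
  | [] => []
  | c :: t =>
    if old.isPrefixOf (c :: t) then new ++ repl old new (List.drop (old.length - 1) t)
    else c :: repl old new t
termination_by cs.length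
decreasing_by
  · simpa using Nat.lt_succ_of_le (List.length_drop (l := t) (i := old.length - 1) ▸ Nat.sub_le _ _)
  · simp

-- A's loop at the character level
def foldA (x : List Char) (ws : List (List Char)) : List Char :=
  ws.foldl (fun x w => repl w (pvWrap w) x) x

def noPat (t : List Char) : Prop := ∀ p ∈ pvPatterns, ¬ p <:+: t

theorem repl_nil (old new : List Char) : repl old new [] = [] := by
  simp [repl]

theorem repl_cons_pos (old new : List Char) (c : Char) (t : List Char)
    (h : old.isPrefixOf (c :: t) = true) :
    repl old new (c :: t) = new ++ repl old new (List.drop (old.length - 1) t) := by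
  rw [repl]; simp [h]

theorem repl_cons_neg (old new : List Char) (c : Char) (t : List Char)
    (h : ¬ old.isPrefixOf (c :: t) = true) :
    repl old new (c :: t) = c :: repl old new t := by
  rw [repl]; simp [h]

-- PySem's replace loop agrees with repl (for a nonempty pattern the fuel never runs out)
theorem go_eq_repl (old new : List Char) (hold : old ≠ []) :
    ∀ (fuel : Nat) (l acc : List Char), l.length ≤ fuel →
      PySem.Chars.replace.go old new fuel l acc = acc.reverse ++ repl old new l := by
  intro fuel
  induction fuel with
  | zero =>
    intro l acc hl
    have hl0 : l = [] := by cases l <;> simp_all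
    subst hl0
    rw [PySem.Chars.replace.go.eq_def]
    simp [repl_nil]
  | succ f ih =>
    intro l acc hl
    cases l with
    | nil =>
      rw [PySem.Chars.replace.go.eq_def]
      simp [repl_nil]
    | cons c t =>
      rw [PySem.Chars.replace.go.eq_def]
      by_cases h : old.isPrefixOf (c :: t) = true
      · simp only [h, if_pos]
        obtain ⟨o, os, rfl⟩ : ∃ o os, old = o :: os := by
          cases old with
          | nil => exact absurd rfl hold
          | cons o os => exact ⟨o, os, rfl⟩
        have hdrop : List.drop (o :: os).length (c :: t) = List.drop ((o :: os).length - 1) t := by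
          simp
        rw [hdrop, ih _ (new.reverse ++ acc)
            (le_trans (by simpa using Nat.sub_le t.length os.length) (Nat.le_of_succ_le_succ hl))]
        rw [repl_cons_pos _ _ _ _ h]
        simp
      · simp only [h, if_neg, Bool.false_eq_true, not_false_eq_true]
        rw [ih t (c :: acc) (Nat.le_of_succ_le_succ hl)]
        rw [repl_cons_neg _ _ _ _ h]
        simp

theorem replace_eq_repl (old new s : List Char) (hold : old ≠ []) :
    PySem.Chars.replace s old new = repl old new s := by
  rw [PySem.Chars.replace]
  have : old.isEmpty = false := by cases old <;> simp_all
  rw [this]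
  simpa using go_eq_repl old new hold s.length s [] le_rfl

-- decomposing a prefix of an append
theorem prefix_append_cases {p a x : List Char} (h : p <+: a ++ x) :
    p <+: a ∨ ∃ q, p = a ++ q ∧ q <+: x := by
  induction a generalizing p with
  | nil => exact Or.inr ⟨p, by simp, by simpa using h⟩
  | cons d a' ih =>
    cases p with
    | nil => exact Or.inl (List.nil_prefix)
    | cons e p' =>
      rw [List.cons_append, List.cons_prefix_cons] at h
      obtain ⟨rfl, h'⟩ := h
      rcases ih h' with h1 | ⟨q, rfl, hq⟩
      · exact Or.inl (List.cons_prefix_cons.mpr ⟨rfl, h1⟩)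
      · exact Or.inr ⟨q, rfl, hq⟩

-- replace passes over a block in which the pattern never starts
theorem repl_append_of_nocc (old new : List Char) (a x : List Char)
    (h : ∀ k, k < a.length → ¬ old <+: (a.drop k ++ x)) :
    repl old new (a ++ x) = a ++ repl old new x := by
  induction a with
  | nil => simp
  | cons d a' ih =>
    have h0 : ¬ old.isPrefixOf (d :: (a' ++ x)) = true := by
      intro hb
      exact h 0 (by simp) (by simpa using List.isPrefixOf_iff_prefix.mp hb)
    rw [List.cons_append, repl_cons_neg _ _ _ _ h0]
    rw [ih (fun k hk => by simpa using h (k + 1) (by simpa using Nat.succ_lt_succ hk))]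
    simp

-- replace consumes the pattern at the head
theorem repl_self (w new x : List Char) (hw : w ≠ []) :
    repl w new (w ++ x) = new ++ repl w new x := by
  obtain ⟨c, w', rfl⟩ : ∃ c w', w = c :: w' := by
    cases w with
    | nil => exact absurd rfl hw
    | cons c w' => exact ⟨c, w', rfl⟩
  have hp : (c :: w').isPrefixOf ((c :: w') ++ x) = true :=
    List.isPrefixOf_iff_prefix.mpr ⟨x, rfl⟩
  rw [List.cons_append, repl_cons_pos _ _ _ _ (by simpa using hp)]
  simp [List.drop_left']

-- a '<'-free prefix of a replace result is a prefix of the argument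
theorem repl_letter_prefix (old new : List Char) (hold : old ≠ [])
    (hnew : ∃ r, new = '<' :: r) :
    ∀ (n : Nat) (s : List Char), s.length ≤ n → ∀ p, (∀ c ∈ p, c ≠ '<') →
      p <+: repl old new s → p <+: s := by
  intro n
  induction n with
  | zero =>
    intro s hs p hp hpre
    have : s = [] := by cases s <;> simp_all
    subst this
    simpa [repl_nil] using hpre
  | succ m ih =>
    intro s hs p hp hpre
    cases s with
    | nil => simpa [repl_nil] using hpre
    | cons c t =>
      by_cases h : old.isPrefixOf (c :: t) = true
      · rw [repl_cons_pos _ _ _ _ h] at hpre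
        obtain ⟨r, rfl⟩ := hnew
        cases p with
        | nil => exact List.nil_prefix
        | cons e p' =>
          rw [List.cons_append, List.cons_prefix_cons] at hpre
          exact absurd hpre.1 (hp e (by simp))
      · rw [repl_cons_neg _ _ _ _ h] at hpre
        cases p with
        | nil => exact List.nil_prefix
        | cons e p' =>
          rw [List.cons_prefix_cons] at hpre ⊢
          exact ⟨hpre.1, ih t (Nat.le_of_succ_le_succ hs) p'
            (fun d hd => hp d (by simp [hd])) hpre.2⟩

-- the wrapper starts with '<'
theorem pvWrap_head (w : List Char) : ∃ r, pvWrap w = '<' :: r :=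
  ⟨"emphasis level=\"moderate\">".toList ++ w ++ "</emphasis>".toList, rfl⟩

-- every nonempty suffix of a wrapped word contains '>'
theorem wrap_suffix_gt (w s : List Char) (hs : s <:+ pvWrap w) (hne : s ≠ []) :
    '>' ∈ s := by
  obtain ⟨a, ha⟩ := hs
  have h1 : s.getLast? = some '>' := by
    have h2 : (a ++ s).getLast? = s.getLast? := List.getLast?_append_of_ne_nil _ hne
    rw [ha] at h2
    rw [← h2]
    show (("<emphasis level=\"moderate\">".toList ++ w) ++ "</emphasis>".toList).getLast? = _
    rw [List.getLast?_append_of_ne_nil _ (show ("</emphasis>".toList : List Char) ≠ [] by decide)]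
    decide
  exact List.mem_of_getLast? h1

-- ===== concrete facts about the keyword table (checked by decide) =====

theorem fact_words_bool :
    (pvWords.all fun w => !w.isEmpty && w.all fun c => c != '<' && c != '>') = true := by decide

theorem fact_words : ∀ w ∈ pvWords, w ≠ [] ∧ ∀ c ∈ w, c ≠ '<' ∧ c ≠ '>' := by
  intro w hw
  have h := List.all_eq_true.mp fact_words_bool w hw
  simp only [Bool.and_eq_true, List.all_eq_true, bne_iff_ne, ne_eq,
    Bool.not_eq_true', List.isEmpty_eq_false_iff] at h
  exact ⟨h.1, fun c hc => (h.2 c hc)⟩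

theorem fact_nodup : pvWords.Nodup := by decide

theorem fact_noinfix_bool :
    (pvWords.all fun w => pvWords.all fun v => (v == w) || !(PySem.Chars.isIn v w)) = true := by
  decide

theorem fact_noinfix : ∀ w ∈ pvWords, ∀ v ∈ pvWords, v ≠ w → ¬ v <:+: w := by
  intro w hw v hv hne hinf
  have h := List.all_eq_true.mp (List.all_eq_true.mp fact_noinfix_bool w hw) v hv
  simp only [Bool.or_eq_true, beq_iff_eq, Bool.not_eq_true'] at h
  rcases h with h | h
  · exact hne h
  · exact (PySem.Chars.isIn_eq_false_iff v w).mp h hinf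

theorem fact_noinfix_wrap_bool :
    (pvWords.all fun w => pvWords.all fun v =>
      (v == w) || !(PySem.Chars.isIn v (pvWrap w))) = true := by decide

theorem fact_noinfix_wrap : ∀ w ∈ pvWords, ∀ v ∈ pvWords, v ≠ w → ¬ v <:+: pvWrap w := by
  intro w hw v hv hne hinf
  have h := List.all_eq_true.mp (List.all_eq_true.mp fact_noinfix_wrap_bool w hw) v hv
  simp only [Bool.or_eq_true, beq_iff_eq, Bool.not_eq_true'] at h
  rcases h with h | h
  · exact hne h
  · exact (PySem.Chars.isIn_eq_false_iff v (pvWrap w)).mp h hinf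

-- every overlap of a dict-earlier keyword with the tail of a dict-later keyword
-- is one of the 8 recorded glue patterns
theorem fact_pat_bool : ((List.range pvWords.length).all fun j => (List.range j).all fun i =>
    (List.range (pvWords.getD j []).length).all fun k =>
      !(((pvWords.getD j []).drop k).isPrefixOf (pvWords.getD i [])) ||
        pvPatterns.contains (pvWords.getD j [] ++
          (pvWords.getD i []).drop ((pvWords.getD j []).length - k))) = true := by
  decide

theorem fact_pat : ∀ j, j < pvWords.length → ∀ i, i < j →
    ∀ k, k < (pvWords.getD j []).length →
    ((pvWords.getD j []).drop k).isPrefixOf (pvWords.getD i []) = true →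
    (pvWords.getD j [] ++ (pvWords.getD i []).drop ((pvWords.getD j []).length - k)) ∈ pvPatterns := by
  intro j hj i hi k hk hpre
  have h := fact_pat_bool
  simp only [List.all_eq_true, List.mem_range] at h
  have h' := h j hj i hi k hk
  simp only [hpre, Bool.not_true, Bool.false_or] at h'
  exact List.contains_iff_mem.mp h'

-- ===== the fuel of altScanF never runs out =====

theorem altScanF_fuel (f : Nat) : ∀ (l : List Char), l.length ≤ f →
    altScanF f l = altScanF l.length l := by
  induction f using Nat.strong_induction_on with
  | _ f ih =>
    intro l hl
    cases l with
    | nil => cases f <;> rfl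
    | cons c t =>
      cases f with
      | zero => simp at hl
      | succ m =>
        have hm : t.length ≤ m := Nat.le_of_succ_le_succ hl
        show altScanF (m + 1) (c :: t) = altScanF (t.length + 1) (c :: t)
        rw [altScanF, altScanF]
        cases hfind : pvWords.find? (fun w => w.isPrefixOf (c :: t)) with
        | none =>
          simp only
          rw [ih m (Nat.lt_succ_self m) t hm]
        | some w =>
          simp only
          have hd : (List.drop (w.length - 1) t).length ≤ t.length := by simp
          rw [ih m (Nat.lt_succ_self m) _ (le_trans hd hm),
            ih t.length (Nat.lt_succ_of_le hm) _ hd]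

theorem altScan_nil : altScan [] = [] := rfl

theorem altScan_cons_none (c : Char) (t : List Char)
    (h : pvWords.find? (fun w => w.isPrefixOf (c :: t)) = none) :
    altScan (c :: t) = c :: altScan t := by
  show altScanF (t.length + 1) (c :: t) = _
  rw [altScanF]
  simp only [h]
  rfl

theorem altScan_cons_some (c : Char) (t : List Char) (w : List Char)
    (h : pvWords.find? (fun w => w.isPrefixOf (c :: t)) = some w) :
    altScan (c :: t) = pvWrap w ++ altScan (List.drop (w.length - 1) t) := by
  show altScanF (t.length + 1) (c :: t) = _
  rw [altScanF]
  simp only [h]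
  rw [altScanF_fuel t.length _ (by simp)]
  rfl

-- ===== letter-prefix invariant =====


def LP (u x : List Char) : Prop := ∀ p, (∀ c ∈ p, c ≠ '<') → p <+: x → p <+: u

theorem LP_refl (u : List Char) : LP u u := fun _ _ h => h

theorem LP_repl (u x old : List Char) (hold : old ≠ []) (h : LP u x) :
    LP u (repl old (pvWrap old) x) := by
  intro p hp hpre
  exact h p hp (repl_letter_prefix old (pvWrap old) hold (pvWrap_head old)
    x.length x le_rfl p hp hpre)

-- ===== foldA structure lemmas =====

theorem foldA_nil (ws : List (List Char)) : foldA [] ws = [] := by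
  induction ws with
  | nil => rfl
  | cons w rest ih => simpa [foldA, repl_nil] using ih

theorem foldA_append (x : List Char) (as bs : List (List Char)) :
    foldA x (as ++ bs) = foldA (foldA x as) bs := by
  simp [foldA, List.foldl_append]

-- no keyword matches at the head: the head character passes through all passes
theorem foldA_skip_head (ws : List (List Char))
    (hws : ∀ w ∈ ws, w ≠ [] ∧ ∀ c ∈ w, c ≠ '<') :
    ∀ (c : Char) (t0 : List Char), (∀ w ∈ ws, ¬ w <+: (c :: t0)) →
      foldA (c :: t0) ws = c :: foldA t0 ws := by
  induction ws with
  | nil => intro c t0 _; rfl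
  | cons w rest ih =>
    intro c t0 hpre
    obtain ⟨hwne, hwc⟩ := hws w (by simp)
    have h0 : ¬ w.isPrefixOf (c :: t0) = true := by
      intro hb
      exact hpre w (by simp) (List.isPrefixOf_iff_prefix.mp hb)
    show foldA (repl w (pvWrap w) (c :: t0)) rest = c :: foldA (repl w (pvWrap w) t0) rest
    rw [repl_cons_neg _ _ _ _ h0]
    refine ih (fun v hv => hws v (by simp [hv])) c (repl w (pvWrap w) t0) ?_
    intro v hv hvpre
    cases v with
    | nil => exact hpre [] (by simp [hv]) List.nil_prefix
    | cons e p =>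
      rw [List.cons_prefix_cons] at hvpre
      obtain ⟨rfl, hp⟩ := hvpre
      have hp' : p <+: t0 := repl_letter_prefix w (pvWrap w) hwne (pvWrap_head w)
        t0.length t0 le_rfl p
        (fun d hd => (hws (e :: p) (by simp [hv])).2 d (by simp [hd])) hp
      exact hpre (e :: p) (by simp [hv]) (List.cons_prefix_cons.mpr ⟨rfl, hp'⟩)

-- the keyword block w at the head survives the passes of the words as
theorem foldA_pre (w u : List Char) (as : List (List Char))
    (has : ∀ wi ∈ as, wi ≠ [] ∧ (∀ c ∈ wi, c ≠ '<' ∧ c ≠ '>') ∧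
      (∀ k, k < w.length → ¬ wi <+: w.drop k) ∧
      (∀ q, q ≠ [] → (∃ k, k < w.length ∧ wi = w.drop k ++ q) → ¬ q <+: u)) :
    ∀ x, LP u x → foldA (w ++ x) as = w ++ foldA x as := by
  induction as with
  | nil => intro x _; rfl
  | cons wi rest ih =>
    intro x hLP
    obtain ⟨hne, hcs, hnp, hq⟩ := has wi (by simp)
    have hnocc : ∀ k, k < w.length → ¬ wi <+: (w.drop k ++ x) := by
      intro k hk hpfx
      rcases prefix_append_cases hpfx with h1 | ⟨q, hq1, hq2⟩
      · exact hnp k hk h1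
      · cases q with
        | nil => exact hnp k hk (by rw [hq1]; simp)
        | cons e q' =>
          have hqmem : ∀ c ∈ (e :: q'), c ≠ '<' := by
            intro d hd
            exact (hcs d (by rw [hq1]; exact List.mem_append_right _ hd)).1
          exact hq (e :: q') (by simp) ⟨k, hk, hq1⟩ (hLP _ hqmem hq2)
    show foldA (repl wi (pvWrap wi) (w ++ x)) rest = w ++ foldA (repl wi (pvWrap wi) x) rest
    rw [repl_append_of_nocc _ _ _ _ hnocc]
    exact ih (fun v hv => has v (by simp [hv])) _ (LP_repl u x wi hne hLP)

-- the wrapped block survives the passes of the remaining words bs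
theorem foldA_post (w : List Char) (bs : List (List Char))
    (hbs : ∀ v ∈ bs, (∀ c ∈ v, c ≠ '<' ∧ c ≠ '>') ∧ ¬ v <:+: pvWrap w) :
    ∀ y, foldA (pvWrap w ++ y) bs = pvWrap w ++ foldA y bs := by
  induction bs with
  | nil => intro y; rfl
  | cons v rest ih =>
    intro y
    obtain ⟨hcs, hni⟩ := hbs v (by simp)
    have hnocc : ∀ k, k < (pvWrap w).length → ¬ v <+: ((pvWrap w).drop k ++ y) := by
      intro k hk hpfx
      rcases prefix_append_cases hpfx with h1 | ⟨q, hq1, _⟩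
      · exact hni (h1.isInfix.trans (List.drop_suffix k _).isInfix)
      · have hdne : (pvWrap w).drop k ≠ [] := by
          intro h0
          rw [List.drop_eq_nil_iff] at h0
          omega
        have : '>' ∈ v := by
          rw [hq1]
          exact List.mem_append_left _ (wrap_suffix_gt w _ (List.drop_suffix k _) hdne)
        exact (hcs '>' this).2 rfl
    show foldA (repl v (pvWrap v) (pvWrap w ++ y)) rest = pvWrap w ++ foldA (repl v (pvWrap v) y) rest
    rw [repl_append_of_nocc _ _ _ _ hnocc]
    exact ih (fun v' hv' => hbs v' (by simp [hv'])) _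

-- find? decomposition
theorem find?_decomp {α : Type} (p : α → Bool) (l : List α) (b : α)
    (h : l.find? p = some b) :
    ∃ as bs, l = as ++ b :: bs ∧ (∀ a ∈ as, p a = false) ∧ p b = true := by
  induction l with
  | nil => simp at h
  | cons x xs ih =>
    by_cases hx : p x = true
    · rw [List.find?_cons_of_pos hx] at h
      obtain rfl : x = b := by simpa using h
      exact ⟨[], xs, rfl, by simp, hx⟩
    · rw [List.find?_cons_of_neg (by simpa using hx)] at h
      obtain ⟨as, bs, rfl, h1, h2⟩ := ih h
      exact ⟨x :: as, bs, rfl, by simpa [hx] using h1, h2⟩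

theorem noPat_suffix {u t : List Char} (h : u <:+ t) (hn : noPat t) : noPat u :=
  fun p hp hi => hn p hp (hi.trans h.isInfix)

-- ===== the main equivalence: A's 14 passes compute the single scan =====

theorem main_eq : ∀ (n : Nat) (t : List Char), t.length ≤ n → noPat t →
    foldA t pvWords = altScan t := by
  intro n
  induction n with
  | zero =>
    intro t ht _
    have : t = [] := by cases t <;> simp_all
    subst this
    rw [altScan_nil, foldA_nil]
  | succ m ih =>
    intro t ht hnp
    cases t with
    | nil => rw [altScan_nil, foldA_nil]
    | cons c t0 =>
      cases hfind : pvWords.find? (fun w => w.isPrefixOf (c :: t0)) with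
      | none =>
        have hnone : ∀ w ∈ pvWords, ¬ w <+: (c :: t0) := by
          intro w hw hpre
          have := List.find?_eq_none.mp hfind w hw
          simp [List.isPrefixOf_iff_prefix.mpr hpre] at this
        rw [altScan_cons_none c t0 hfind]
        rw [foldA_skip_head pvWords
          (fun w hw => ⟨(fact_words w hw).1, fun d hd => ((fact_words w hw).2 d hd).1⟩)
          c t0 hnone]
        rw [ih t0 (Nat.le_of_succ_le_succ ht) ?_]
        · exact noPat_suffix ⟨[c], rfl⟩ hnp
      | some w =>
        obtain ⟨as, bs, hsplit, hfail, hok⟩ := find?_decomp _ _ _ hfind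
        have hwmem : w ∈ pvWords := by rw [hsplit]; simp
        have hwne : w ≠ [] := (fact_words w hwmem).1
        obtain ⟨u, hu⟩ : ∃ u, w ++ u = c :: t0 := List.isPrefixOf_iff_prefix.mp hok
        -- rewrite altScan
        obtain ⟨cw, w0, rfl⟩ : ∃ cw w0, w = cw :: w0 := by
          cases w with
          | nil => exact absurd rfl hwne
          | cons cw w0 => exact ⟨cw, w0, rfl⟩
        have hcw : cw = c := by
          have := hu
          simp [List.cons_append] at this
          exact this.1
        subst hcw
        have ht0 : w0 ++ u = t0 := by
          simpa [List.cons_append] using hu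
        have hdrop : List.drop ((cw :: w0).length - 1) t0 = u := by
          rw [← ht0]
          simpa using (List.drop_left (l₁ := w0) (l₂ := u))
        have hscan : altScan (cw :: t0) = pvWrap (cw :: w0) ++ altScan u := by
          rw [altScan_cons_some cw t0 _ hfind, hdrop]
        -- rewrite foldA
        have hnpu : noPat u := noPat_suffix ⟨cw :: w0, hu⟩ hnp
        have hlenu : u.length ≤ m := by
          have hl1 : w0.length + u.length = t0.length := by
            simpa using congrArg List.length hu
          have hl2 : t0.length ≤ m := by simpa using ht
          omega
        have hpre_facts : ∀ wi ∈ as, wi ≠ [] ∧ (∀ d ∈ wi, d ≠ '<' ∧ d ≠ '>') ∧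
            (∀ k, k < (cw :: w0).length → ¬ wi <+: (cw :: w0).drop k) ∧
            (∀ q, q ≠ [] → (∃ k, k < (cw :: w0).length ∧ wi = (cw :: w0).drop k ++ q) →
              ¬ q <+: u) := by
          intro wi hwi
          have hwimem : wi ∈ pvWords := by rw [hsplit]; exact List.mem_append_left _ hwi
          have hwine : wi ≠ cw :: w0 := by
            intro h0
            have hnd := fact_nodup
            rw [hsplit] at hnd
            exact absurd h0 ((List.nodup_append.mp hnd).2.2 wi hwi (cw :: w0) (List.mem_cons_self ..))
          refine ⟨(fact_words wi hwimem).1, (fact_words wi hwimem).2, ?_, ?_⟩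
          · intro k _ hpre
            exact fact_noinfix (cw :: w0) hwmem wi hwimem hwine
              (hpre.isInfix.trans (List.drop_suffix k _).isInfix)
          · intro q hqne ⟨k, hk, hql⟩ hqu
            -- the glue pattern (cw::w0) ++ q occurs in the input: contradiction with noPat
            obtain ⟨i, hi, hieq⟩ := List.mem_iff_getElem.mp hwi
            have hij : i < as.length := hi
            have hgetwi : pvWords.getD i [] = wi := by
              rw [hsplit, List.getD_eq_getElem _ _ (by simp; omega)]
              rw [List.getElem_append_left hij]
              exact hieq
            have hjlen : as.length < pvWords.length := by rw [hsplit]; simp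
            have hgetw : pvWords.getD as.length [] = cw :: w0 := by
              rw [hsplit, List.getD_eq_getElem _ _ (by simp)]
              simp
            have hkpre : ((cw :: w0).drop k).isPrefixOf wi = true := by
              rw [hql]
              exact List.isPrefixOf_iff_prefix.mpr ⟨q, rfl⟩
            have hqdef : wi.drop ((cw :: w0).length - k) = q := by
              rw [hql, ← List.length_drop (l := cw :: w0) (i := k)]
              exact List.drop_left
            have hpat := fact_pat as.length hjlen i (by omega) k (by rw [hgetw]; exact hk)
            rw [hgetwi, hgetw, hqdef] at hpat
            have hpat' := hpat hkpre
            -- (cw::w0) ++ q is a prefix of (cw::w0) ++ u = the current text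
            obtain ⟨r, hr⟩ := hqu
            exact hnp _ hpat' ⟨[], r, by rw [← hu, ← hr]; simp⟩
        rw [← hu, hsplit, foldA_append, foldA_pre _ u as hpre_facts u (LP_refl u)]
        show foldA (repl (cw :: w0) (pvWrap (cw :: w0)) ((cw :: w0) ++ foldA u as)) bs = _
        rw [repl_self _ _ _ hwne]
        have hpost_facts : ∀ v ∈ bs, (∀ d ∈ v, d ≠ '<' ∧ d ≠ '>') ∧
            ¬ v <:+: pvWrap (cw :: w0) := by
          intro v hv
          have hvmem : v ∈ pvWords := by
            rw [hsplit]; exact List.mem_append_right _ (by simp [hv])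
          have hvne : v ≠ cw :: w0 := by
            intro h0
            have hnd := fact_nodup
            rw [hsplit] at hnd
            have hnmem : (cw :: w0) ∉ bs := (List.nodup_cons.mp (List.nodup_append.mp hnd).2.1).1
            exact hnmem (h0 ▸ hv)
          exact ⟨(fact_words v hvmem).2, fact_noinfix_wrap _ hwmem v hvmem hvne⟩
        rw [foldA_post _ bs hpost_facts]
        have hfin : foldA (repl (cw :: w0) (pvWrap (cw :: w0)) (foldA u as)) bs
            = altScan u := by
          have : foldA u pvWords = altScan u := ih u hlenu hnpu
          rw [← this, hsplit, foldA_append]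
          rfl
        rw [hfin, hu, hscan]

-- ===== bridging the String-level port A to foldA =====

theorem str_fold_bridge : ∀ (ps : List (String × String)) (s : String),
    (∀ p ∈ ps, p.1.toList ≠ []) →
    ps.foldl (fun t wr => PySem.Str.replace t wr.1
        ("<emphasis level=\"moderate\">" ++ wr.1 ++ "</emphasis>")) s
      = String.ofList (foldA s.toList (ps.map (fun p => p.1.toList))) := by
  intro ps
  induction ps with
  | nil => intro s _; simp [foldA]
  | cons p rest ih =>
    intro s hps
    show rest.foldl _ (PySem.Str.replace s p.1 _) = _
    rw [ih _ (fun q hq => hps q (by simp [hq]))]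
    congr 1
    show foldA (PySem.Str.replace s p.1 _).toList _ = _
    rw [PySem.Str.toList_replace]
    rw [replace_eq_repl _ _ _ (hps p (by simp))]
    have hwrap : ("<emphasis level=\"moderate\">" ++ p.1 ++ "</emphasis>").toList
        = pvWrap p.1.toList := by
      simp [pvWrap, String.toList_append]
    rw [hwrap]
    rfl

theorem items_eq : pvImprovements.items =
    [("abogada", "abogáda"), ("legal", "legál"), ("cliente", "clienté"),
     ("proceso", "procéso"), ("judicial", "judiciál"), ("documento", "documentó"),
     ("contrato", "contráto"), ("custodia", "custódia"), ("pensión", "pensión"),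
     ("alimentaria", "alimentária"), ("herencia", "heréncia"),
     ("testamento", "testaménto"), ("demanda", "demánda"), ("juzgado", "juzgádo")] := by
  decide

theorem bridgeA (text : String) :
    improve_pronunciation text = String.ofList (foldA text.toList pvWords) := by
  rw [improve_pronunciation, items_eq, str_fold_bridge _ _ (by decide)]
  rfl

-- ===== VERDICT (by name: the statement is the Claim_ definition above) =====
theorem improve_pronunciation_spec : Claim_equal_improve_pronunciation := by
  intro text _ hP
  have hnp : noPat text.toList := by
    intro p hp hinf
    obtain ⟨h1, h2, h3, h4, h5, h6, h7, h8⟩ := hP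
    simp only [pvPatterns, List.mem_cons, List.not_mem_nil, or_false] at hp
    rcases hp with rfl | rfl | rfl | rfl | rfl | rfl | rfl | rfl
    · exact absurd ((PySem.Str.isIn_iff_infix _ text).mpr hinf) (by simpa using h1)
    · exact absurd ((PySem.Str.isIn_iff_infix _ text).mpr hinf) (by simpa using h2)
    · exact absurd ((PySem.Str.isIn_iff_infix _ text).mpr hinf) (by simpa using h3)
    · exact absurd ((PySem.Str.isIn_iff_infix _ text).mpr hinf) (by simpa using h4)
    · exact absurd ((PySem.Str.isIn_iff_infix _ text).mpr hinf) (by simpa using h5)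
    · exact absurd ((PySem.Str.isIn_iff_infix _ text).mpr hinf) (by simpa using h6)
    · exact absurd ((PySem.Str.isIn_iff_infix _ text).mpr hinf) (by simpa using h7)
    · exact absurd ((PySem.Str.isIn_iff_infix _ text).mpr hinf) (by simpa using h8)
  show improve_pronunciation text = improve_pronunciation_alt text
  rw [bridgeA, improve_pronunciation_alt,
    main_eq text.toList.length text.toList le_rfl hnp]
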